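/- GENERATED by mk_final_copies.py from the proof of the farm's unit `start_decoder.9d` (farm:start_decoder.9d.1: Proof.lean) as the
   re-elaboration sweep compiled it — do not edit. -/
import Asan.CheckWalk
import Vorbis.Spec.Units.start_decoder_9d

/-!
  Unit `start_decoder.9d`: a child of the split of segment `.9` of start_decoder (Vorbis/Spec/StartDecoder9.lean: the cut assertion
  `In9`, the claims, `Seg9.of_parts`). The walk is the farm worker's (unit start_decoder.9, attempt 1) over the carry layer of
  Vorbis/Spec/StartDecoder1.lean (`P1.sd2_carry`, `P1.frame_carry`, `P1.layout_facts`, `P1.wmax_ok`) and the exit lemmas of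
  `Vorbis.Spec.StartDecoder.S9` (`mid_exit`, `err_exit`, `err4_exit`).
-/

open X86 X86.User Asan Vorbis Vorbis.Spec Vorbis.Spec.StartDecoder Vorbis.Spec.StartDecoder.P1 Vorbis.Spec.StartDecoder.S9

set_option maxRecDepth 4000
set_option maxHeartbeats 4000000

namespace Vorbis.Spec.start_decoder_9d

/-- **Segment `.9`, part d** (0x11420a … 0x11421f, stub 0x114415): the test of `vorbis_validate`'s result, `error(f, 0x14)` on the stub,
`get_bits(f, 8)`: to `cut78` with `rax < 256`, or to the epilogue. -/
theorem seg9d (Lay : Layout) (hLay : Lay.hi = 0x1000000) (μ : Microarch) (hμ : UserX.MicroOK μ) (u₀ : State)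
    (hcode : HasCodeNat Lay u₀ Vorbis.L.start_decoder.entry Vorbis.Code.code_start_decoder.nat Vorbis.L.start_decoder.size)
    (h_err : ∀ (others : List Obj) (frames : List (Nat × FrameLayout)),
      Calls Lay μ Vorbis.WayInv (Vorbis.conv u₀) Vorbis.L.error.entry (Vorbis.Spec.error.spec others frames))
    (h_gb : ∀ (others : List Obj) (frames : List (Nat × FrameLayout)) (Blk : Block → Prop) (len : Nat),
      Calls Lay μ Vorbis.WayInv (Vorbis.conv u₀) Vorbis.L.get_bits.entry (Vorbis.Spec.get_bits.spec others frames Blk len))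
    (g : Ghost) (A : Arena × List Obj) (v : State) (hb : In9 u₀ g Vorbis.L.start_decoder.cut77 A v) :
    ReachVia Lay μ WayInv v (fun w =>
      (∃ A, In9 u₀ g Vorbis.L.start_decoder.cut78 A w ∧ (w.reg .rax).toNat < 256) ∨ AtERR u₀ g w) := by
  have he := hb.frame.entry
  v_entry he
  simp only [depth] at he_room he_stack
  have hlay := layout_facts hb.frame hb.hand hb.sd
  have eRA : g.RA = (g.e.reg .rsp).toNat := rfl
  have ef : g.f = (g.e.reg .rdi).toNat := rfl
  rw [eRA, ef] at hlay
  obtain ⟨hRA, hR8, _, _, hfstack, hflo, hfhi, hflog, hfcrc, hfout, hAstack, hAcrc, hAhi, hAlo⟩ := hlay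
  have w_rip := hb.frame.rip
  have w_rsp : v.reg .rsp = g.e.reg .rsp - 1480 := by
    rw [hb.frame.rsp]
    apply UInt64.toNat_inj.mp
    rw [toNat_addr _ (by omega)]
    u_omega
  have w_rbp : v.reg .rbp = g.e.reg .rdi := by
    rw [hb.rbp]
    exact addr_toNat _
  have hRw : g.e.reg .rsp - 1480 = addr g.R := by
    rw [← w_rsp]
    exact hb.frame.rsp
  have c_rsp := w_rsp
  have c_rbp := w_rbp
  have w_eq : Mem.EqOn Vorbis.L.textLo Vorbis.L.textHi u₀.mem v.mem := hb.frame.code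
  have hdf : v.flags .df = false := (show abiInv _ from hb.frame.inv).1
  have hmx : v.mxcsr &&& 0x1F80 = 0x1F80 := (show abiInv _ from hb.frame.inv).2
  have hsse := Vorbis.sseOK_of_abiInv hb.frame.inv
  have henvR : ReaderEnv A.2 g.frames' (g.Blk A) g.len g.f := readerEnv hb.hand hb.sd.env.live
  have hobjL : LiveIn A.2 g.frames' g.f Off.sizeof.stb_vorbis := hb.hand.obj.mono (sub_frames' g A)
  have herr' := h_err A.2 g.frames'
  have hgb' := h_gb A.2 g.frames' (g.Blk A) g.len
  obtain ⟨z0, w_rax⟩ : ∃ z, v.reg .rax = z := ⟨_, rfl⟩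
  u_walk hcode [hμ.vendor] until [Vorbis.L.start_decoder.cut4] span [Vorbis.L.textLo, Vorbis.L.textHi] side (v_side)
  case call_inv =>
    v_inv
  case pre_11441d =>
    -- error(f, 0x14)
    have hun : ShadowUntouched v.mem s_11441d.mem := by v_untouched
    have hrsp8 : (s_11441d.reg .rsp).toNat + 8 = g.R := by
      rw [w_rsp]
      u_omega
    refine ⟨⟨?_, hb.frame.offText⟩, ?_⟩
    · rw [hrsp8]
      exact hb.frame.shadow.untouched hun
    · rw [w_rdi, ← ef]
      exact hobjL
  case call_inv =>
    v_inv
  case pre_11421a =>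
    -- get_bits(f, 8)
    have hun : ShadowUntouched v.mem s_11421a.mem := by v_untouched
    have hrsp8 : (s_11421a.reg .rsp).toNat + 8 = g.R := by
      rw [w_rsp]
      u_omega
    refine ⟨⟨⟨?_, hb.frame.offText⟩, ?_, ?_⟩, ?_⟩
    · rw [hrsp8]
      exact hb.frame.shadow.untouched hun
    · rw [w_rdi, ← ef]
      exact henvR
    · rw [w_rdi, ← ef, w_mem]
      have hlt : (g.e.reg Reg.rsp - 1488).toNat + 8 ≤ 2 ^ 64 := by u_omega
      exact (Reader.store_off_obj hb.sd.bits _ 8 _ hlt (by u_omega)).1.bits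
    · rw [bitsArg_def, w_rsi]
      decide
  case cont =>
    -- the stub 0x114415: after error (0x114422)
    v_after_call w_rsp_11441d w_mem_11441d
    simp only [w_rdi_11441d] at w_same
    have hun2 : ShadowUntouched v.mem s_11441dr.mem := by v_untouched
    have hlt : (g.e.reg Reg.rsp - 1488).toNat + 8 ≤ 2 ^ 64 := by u_omega
    have hsame2 : Mem.SameExcept
        [⟨(g.e.reg .rsp).toNat - 1888, (g.e.reg .rsp).toNat - 1480⟩,
       ⟨(g.e.reg .rsp).toNat - 1320, (g.e.reg .rsp).toNat - 1314⟩,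
       ⟨(g.e.reg .rdi).toNat + 48, (g.e.reg .rdi).toNat + 56⟩, ⟨(g.e.reg .rdi).toNat + 84, (g.e.reg .rdi).toNat + 96⟩,
       ⟨(g.e.reg .rdi).toNat + 136, (g.e.reg .rdi).toNat + 144⟩, ⟨(g.e.reg .rdi).toNat + 1484, (g.e.reg .rdi).toNat + 1749⟩,
       ⟨(g.e.reg .rdi).toNat + 1752, (g.e.reg .rdi).toNat + 1784⟩,
       ⟨0x121c00, 0x121c00 + 1024⟩] v.mem s_11441dr.mem := by
      u_same
    have hbits2 : Bits (g.Blk A) g.len s_11441dr.mem g.f := by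
      have hb1 := (Reader.store_off_obj hb.sd.bits (g.e.reg Reg.rsp - 1488) 8 1131554 hlt (by u_omega)).1.bits
      refine bits_miss hb1 w_same ?_
      simp only [List.forall_mem_cons, List.not_mem_nil, false_imp_iff, implies_true, and_true]
      repeat' apply And.intro
      all_goals u_omega
    have w_rax : s_11441dr.reg .rax = 0 := w_post.1
    u_walk hcode [hμ.vendor] until [Vorbis.L.start_decoder.cut4] span [Vorbis.L.textLo, Vorbis.L.textHi] side (v_side)
    refine ReachVia.done (Or.inr ?_)
    have hsameE : Mem.SameExcept
        [⟨(g.e.reg .rsp).toNat - 1888, (g.e.reg .rsp).toNat - 1480⟩,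
       ⟨(g.e.reg .rsp).toNat - 1320, (g.e.reg .rsp).toNat - 1314⟩,
       ⟨(g.e.reg .rdi).toNat + 48, (g.e.reg .rdi).toNat + 56⟩, ⟨(g.e.reg .rdi).toNat + 84, (g.e.reg .rdi).toNat + 96⟩,
       ⟨(g.e.reg .rdi).toNat + 136, (g.e.reg .rdi).toNat + 144⟩, ⟨(g.e.reg .rdi).toNat + 1484, (g.e.reg .rdi).toNat + 1749⟩,
       ⟨(g.e.reg .rdi).toNat + 1752, (g.e.reg .rdi).toNat + 1784⟩,
       ⟨0x121c00, 0x121c00 + 1024⟩] v.mem s_114422.mem := by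
      rw [w_mem]
      exact hsame2
    have hinvE : abiInv s_114422 := by v_inv
    have hraxE : (s_114422.reg .rax).toNat % 2 ^ 32 = 0 := by
      rw [w_rax]
      rfl
    exact err_exit hb hsameE (by rw [w_mem]; exact hun2) (by rw [w_mem]; exact hbits2) w_rip
      (by rw [w_rsp]; exact hRw) w_eq hinvE hraxE
  -- after get_bits (0x11421f)
  v_after_call w_rsp_11421a w_mem_11421a
  simp only [w_rdi_11421a] at w_same
  have hpost1 : GetBitsSpecPost (g.Blk A) g.len (s_11421a.reg .rdi).toNat (bitsArg s_11421a) s_11421a s_11421ar := w_post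
  rw [w_rdi_11421a, ← ef] at hpost1
  have hn8 : bitsArg s_11421a = 8 := by
    rw [bitsArg_def, w_rsi_11421a]
    decide
  rw [hn8] at hpost1
  have hun1 : ShadowUntouched v.mem s_11421ar.mem := by v_untouched
  have hsame1 : Mem.SameExcept
      [⟨(g.e.reg .rsp).toNat - 1888, (g.e.reg .rsp).toNat - 1480⟩,
       ⟨(g.e.reg .rsp).toNat - 1320, (g.e.reg .rsp).toNat - 1314⟩,
       ⟨(g.e.reg .rdi).toNat + 48, (g.e.reg .rdi).toNat + 56⟩, ⟨(g.e.reg .rdi).toNat + 84, (g.e.reg .rdi).toNat + 96⟩,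
       ⟨(g.e.reg .rdi).toNat + 136, (g.e.reg .rdi).toNat + 144⟩, ⟨(g.e.reg .rdi).toNat + 1484, (g.e.reg .rdi).toNat + 1749⟩,
       ⟨(g.e.reg .rdi).toNat + 1752, (g.e.reg .rdi).toNat + 1784⟩,
       ⟨0x121c00, 0x121c00 + 1024⟩] v.mem s_11421ar.mem := by
    u_same
  have hinv1 : abiInv s_11421ar := by v_inv
  have hrbp1 : s_11421ar.reg .rbp = addr g.f := by
    rw [w_kept .rbp rfl]
    exact hb.rbp
  refine ReachVia.done (Or.inl ⟨A, ?_, ?_⟩)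
  · exact mid_exit hb hsame1 hun1 hpost1.bits.bits w_rip (by rw [w_rsp]; exact hRw) w_eq hinv1 hrbp1
  · have := hpost1.bits.result.2 (by omega)
    omega

end Vorbis.Spec.start_decoder_9d

/-- **Unit `start_decoder.9d`** (0x11420a … 0x11421a + the stub 0x114415: the test of vorbis_validate, `get_bits(f, 8)`): the walk `seg9d` above. -/
theorem Vorbis.Spec.Worked.start_decoder_9d_ok : Vorbis.Spec.start_decoder_9d.Statement := by
  intro Lay hLay μ hμ u₀ hcode h_error h_get_bits g A v hb
  exact Vorbis.Spec.start_decoder_9d.seg9d Lay hLay μ hμ u₀ hcode h_error h_get_bits g A v hb
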